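-- pv_equiv track=rewrite | github.com/shindesharad71/Data-Structures | 08.Hashing/16_count_substrings_with_equal.py | get_equal_number
-- ===== SOURCE A (Python) =====
-- def get_equal_number(string: str):
--     n = len(string)
--
--     map = dict()
--
--     map[(0, 0)] = 1
--
--     zc, oc, tc = 0, 0, 0
--
--     res = 0
--
--     for i in range(n):
--         if string[i] == "0":
--             zc += 1
--         elif string[i] == "1":
--             oc += 1
--         else:
--             tc += 1
--
--         tmp = (zc - oc, zc - tc)
--
--         if tmp not in map:
--             res += 0
--         else:
--             res += map[tmp]
--
--         if tmp in map:
--             map[tmp] += 1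
--         else:
--             map[tmp] = 1
--
--     return res
-- ===== SOURCE B (Python) =====
-- def get_equal_number(string: str):
--     n = len(string)
--     res = 0
--     for i in range(n):
--         zc, oc, tc = 0, 0, 0
--         for j in range(i, n):
--             if string[j] == "0":
--                 zc += 1
--             elif string[j] == "1":
--                 oc += 1
--             else:
--                 tc += 1
--             if zc == oc == tc:
--                 res += 1
--     return res
-- ===== Notes on version B (the rewrite author's own statement) =====
-- stated objective: simpler
-- what changed: Replaces the prefix-difference hash map (counting equal prefix signatures via a dict) with a direct brute-force double loop that counts every substring whose three bucket counters are equal, needing no dict and no prefix algebra.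
import Mathlib
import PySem

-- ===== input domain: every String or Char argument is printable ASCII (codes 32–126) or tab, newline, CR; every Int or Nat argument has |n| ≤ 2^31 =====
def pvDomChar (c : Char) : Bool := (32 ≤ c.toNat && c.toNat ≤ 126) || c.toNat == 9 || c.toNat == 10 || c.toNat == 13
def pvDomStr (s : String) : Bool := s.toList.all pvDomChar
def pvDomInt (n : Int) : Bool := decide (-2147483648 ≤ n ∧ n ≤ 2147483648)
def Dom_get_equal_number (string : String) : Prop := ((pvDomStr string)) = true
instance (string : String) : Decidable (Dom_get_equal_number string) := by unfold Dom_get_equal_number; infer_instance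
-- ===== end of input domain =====

-- B replaces A's single-pass prefix-difference dict with a plain brute-force double
-- loop over all substrings (simpler: no dict, no prefix algebra; O(n^2) vs O(n)).

-- ===== PORT A =====
-- A's loop over range(n) with string[i] is ported as structural recursion over string.toList,
-- carrying the dict and the four counters exactly as A does.
def aLoop (m : PySem.Dict (Int × Int) Int) (zc oc tc res : Int) : List Char → Int
  | [] => res
  | c :: rest =>
    let s := if c = '0' then (zc + 1, oc, tc) else if c = '1' then (zc, oc + 1, tc) else (zc, oc, tc + 1)
    let tmp : Int × Int := (s.1 - s.2.1, s.1 - s.2.2)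
    let res' := if m.contains tmp = false then res + 0 else res + m.getD tmp 0
    let m' := if m.contains tmp then m.modify tmp 0 (· + 1) else m.insert tmp 1
    aLoop m' s.1 s.2.1 s.2.2 res' rest

def get_equal_number (string : String) : Int :=
  aLoop ((PySem.Dict.empty).insert ((0 : Int), (0 : Int)) 1) 0 0 0 0 string.toList

-- ===== PORT B =====
-- inner loop of Source B: scan the suffix, bumping the three counters, res += 1 when all equal
def bInner (zc oc tc res : Int) : List Char → Int
  | [] => res
  | c :: rest =>
    let s := if c = '0' then (zc + 1, oc, tc) else if c = '1' then (zc, oc + 1, tc) else (zc, oc, tc + 1)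
    let res' := if s.1 = s.2.1 ∧ s.2.1 = s.2.2 then res + 1 else res
    bInner s.1 s.2.1 s.2.2 res' rest

-- outer loop of Source B: one inner scan per start position (i.e. per suffix)
def bOuter (res : Int) : List Char → Int
  | [] => res
  | c :: rest => bOuter (bInner 0 0 0 res (c :: rest)) rest

def get_equal_number_alt (string : String) : Int :=
  bOuter 0 string.toList

-- ===== PRECONDITION & SPEC =====
def Spec_get_equal_number (string : String) (out : Int) : Prop := out = get_equal_number_alt string
instance (string : String) (out : Int) : Decidable (Spec_get_equal_number string out) := by unfold Spec_get_equal_number; infer_instance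

-- ===== CLAIM (what is proved, stated in full; the proofs are below) =====
def Claim_equal_get_equal_number : Prop := ∀ (string : String), Dom_get_equal_number string → Spec_get_equal_number string (get_equal_number string)

-- ===== LEMMAS AND PROOFS =====

-- prefix-signature machinery shared by the two characterisations
def sigStep (d : Int × Int) (c : Char) : Int × Int :=
  if c = '0' then (d.1 + 1, d.2 + 1) else if c = '1' then (d.1 - 1, d.2) else (d.1, d.2 - 1)

def sigList (d : Int × Int) : List Char → List (Int × Int)
  | [] => []
  | c :: t => sigStep d c :: sigList (sigStep d c) t

def sumFwd : List (Int × Int) → Int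
  | [] => 0
  | x :: t => (t.count x : Int) + sumFwd t

def sumBk : List (Int × Int) → List (Int × Int) → Int
  | _, [] => 0
  | seen, x :: t => (seen.count x : Int) + sumBk (x :: seen) t

def crossCnt (seen : List (Int × Int)) : List (Int × Int) → Int
  | [] => 0
  | x :: t => (seen.count x : Int) + crossCnt seen t

theorem sigStep_add (d e : Int × Int) (c : Char) : sigStep (d + e) c = sigStep d c + e := by
  unfold sigStep
  split_ifs <;> (apply Prod.ext <;> simp <;> ring)

theorem sigList_add (l : List Char) : ∀ (d e : Int × Int),
    sigList (d + e) l = (sigList d l).map (· + e) := by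
  induction l with
  | nil => intro d e; simp [sigList]
  | cons c t ih =>
    intro d e
    simp only [sigList, sigStep_add, List.map_cons]
    exact congrArg _ (ih _ _)

theorem count_map_add (l : List (Int × Int)) (x e : Int × Int) :
    (l.map (· + e)).count (x + e) = l.count x :=
  List.count_map_of_injective l (· + e) (add_left_injective e) x

theorem sumFwd_map_add (l : List (Int × Int)) (e : Int × Int) :
    sumFwd (l.map (· + e)) = sumFwd l := by
  induction l with
  | nil => simp [sumFwd]
  | cons x t ih => simp [sumFwd, ih, count_map_add]

theorem zero_pair_add (d : Int × Int) : ((0, 0) : Int × Int) + d = d := by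
  apply Prod.ext <;> simp

theorem sigList_from (d : Int × Int) (l : List Char) :
    sigList d l = (sigList (0, 0) l).map (· + d) := by
  have h := sigList_add l (0, 0) d
  rwa [zero_pair_add] at h

theorem sumFwd_sigList (d : Int × Int) (l : List Char) :
    sumFwd (sigList d l) = sumFwd (sigList (0, 0) l) := by
  rw [sigList_from, sumFwd_map_add]

theorem count_sigList_self (d : Int × Int) (l : List Char) :
    (sigList d l).count d = (sigList (0, 0) l).count ((0 : Int), (0 : Int)) := by
  have h := count_map_add (sigList (0, 0) l) (0, 0) d
  rw [zero_pair_add] at h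
  rw [sigList_from, h]

-- B's inner loop counts the prefixes of the suffix whose running signature returns to (0,0)
theorem bInner_eq (l : List Char) : ∀ (zc oc tc res : Int),
    bInner zc oc tc res l
      = res + ((sigList (zc - oc, zc - tc) l).count ((0 : Int), (0 : Int)) : Int) := by
  induction l with
  | nil => intro zc oc tc res; simp [bInner, sigList]
  | cons c t ih =>
    intro zc oc tc res
    have main : ∀ (zc' oc' tc' : Int),
        (zc' - oc', zc' - tc') = sigStep (zc - oc, zc - tc) c →
        bInner zc' oc' tc' (if zc' = oc' ∧ oc' = tc' then res + 1 else res) t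
          = res + ((sigList (zc - oc, zc - tc) (c :: t)).count ((0 : Int), (0 : Int)) : Int) := by
      intro zc' oc' tc' htmp
      rw [ih]
      simp only [sigList, List.count_cons, ← htmp]
      by_cases hcnd : zc' = oc' ∧ oc' = tc'
      · have h0 : ((zc' - oc', zc' - tc') : Int × Int) = (0, 0) := by
          rw [Prod.ext_iff]; constructor <;> (simp; omega)
        rw [if_pos hcnd, h0]
        simp
        push_cast
        ring
      · have h0 : ¬ (((0, 0) : Int × Int) = (zc' - oc', zc' - tc')) := by
          rw [Prod.ext_iff]
          intro hh
          exact hcnd ⟨by omega, by omega⟩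
        rw [if_neg hcnd]
        simp [beq_iff_eq]
        omega
    by_cases h0 : c = '0'
    · simpa only [bInner, h0, if_pos rfl] using
        main (zc + 1) oc tc (by apply Prod.ext <;> simp [sigStep, h0] <;> ring)
    · by_cases h1 : c = '1'
      · simpa only [bInner, h0, h1, if_neg h0, if_pos rfl] using
          main zc (oc + 1) tc (by apply Prod.ext <;> simp [sigStep, h1] <;> ring)
      · simpa only [bInner, if_neg h0, if_neg h1] using
          main zc oc (tc + 1) (by apply Prod.ext <;> simp [sigStep, h0, h1] <;> ring)

theorem bOuter_eq (l : List Char) : ∀ (res : Int),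
    bOuter res l = res + sumFwd (((0 : Int), (0 : Int)) :: sigList (0, 0) l) := by
  induction l with
  | nil => intro res; simp [bOuter, sumFwd, sigList]
  | cons c t ih =>
    intro res
    have hstep : sumFwd (((0 : Int), (0 : Int)) :: sigList (0, 0) t)
        = sumFwd (sigList (0, 0) (c :: t)) := by
      simp only [sigList, sumFwd]
      rw [count_sigList_self (sigStep (0, 0) c) t, sumFwd_sigList (sigStep (0, 0) c) t]
    simp only [bOuter]
    rw [ih, bInner_eq]
    simp only [sub_zero]
    rw [hstep]
    simp only [sumFwd]
    ring

-- counting crosses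
theorem crossCnt_cons_seen (t : List (Int × Int)) (x : Int × Int) :
    ∀ seen, crossCnt (x :: seen) t = crossCnt seen t + (t.count x : Int) := by
  induction t with
  | nil => intro seen; simp [crossCnt]
  | cons y s ih =>
    intro seen
    simp only [crossCnt, ih, List.count_cons]
    by_cases h : y = x
    · simp [h, List.count_cons]
      push_cast
      ring
    · have h' : ¬ (x = y) := fun hh => h hh.symm
      simp [h, h', List.count_cons]
      push_cast
      ring

theorem sumBk_eq (l : List (Int × Int)) : ∀ seen,
    sumBk seen l = crossCnt seen l + sumFwd l := by
  induction l with
  | nil => intro seen; simp [sumBk, crossCnt, sumFwd]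
  | cons x t ih =>
    intro seen
    simp only [sumBk, crossCnt, sumFwd, ih, crossCnt_cons_seen]
    ring

theorem crossCnt_singleton (l : List (Int × Int)) (x : Int × Int) :
    crossCnt [x] l = (l.count x : Int) := by
  induction l with
  | nil => simp [crossCnt]
  | cons y t ih =>
    simp only [crossCnt, ih, List.count_cons, List.count_nil]
    by_cases h : y = x
    · simp [h]
      push_cast
      ring
    · have h' : ¬ (x = y) := fun hh => h hh.symm
      simp [h, h']

-- the dict update of one A-step, abstracted: it is a counter of the seen signatures
theorem dictStep_getD (m : PySem.Dict (Int × Int) Int) (seen : List (Int × Int)) (tmp : Int × Int)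
    (hget : ∀ k, m.getD k 0 = (seen.count k : Int))
    (hcon : ∀ k, m.contains k = decide (k ∈ seen)) :
    ∀ k, (if m.contains tmp then m.modify tmp 0 (· + 1) else m.insert tmp 1).getD k 0
      = ((tmp :: seen).count k : Int) := by
  intro k
  by_cases hc : m.contains tmp = true
  · rw [if_pos hc, PySem.Dict.getD_modify]
    by_cases hk : k = tmp
    · simp [hk, hget, List.count_cons]
    · simp [hk, hget, List.count_cons, Ne.symm hk]
  · rw [if_neg hc, PySem.Dict.getD_insert]
    have hnot : tmp ∉ seen := by
      have h := hcon tmp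
      rw [Bool.not_eq_true] at hc
      rw [hc] at h
      exact of_decide_eq_false h.symm
    have hz : seen.count tmp = 0 := List.count_eq_zero.mpr hnot
    by_cases hk : k = tmp
    · simp [hk, List.count_cons, hz]
    · simp [hk, hget, List.count_cons, Ne.symm hk]

theorem dictStep_contains (m : PySem.Dict (Int × Int) Int) (seen : List (Int × Int)) (tmp : Int × Int)
    (hcon : ∀ k, m.contains k = decide (k ∈ seen)) :
    ∀ k, (if m.contains tmp then m.modify tmp 0 (· + 1) else m.insert tmp 1).contains k
      = decide (k ∈ tmp :: seen) := by
  intro k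
  by_cases hc : m.contains tmp = true
  · rw [if_pos hc, PySem.Dict.contains_modify, hcon]
    by_cases hk : k = tmp <;> simp [hk, List.mem_cons]
  · rw [if_neg hc, PySem.Dict.contains_insert, hcon]
    by_cases hk : k = tmp <;> simp [hk, List.mem_cons]

theorem dictStep_res (m : PySem.Dict (Int × Int) Int) (seen : List (Int × Int)) (tmp : Int × Int)
    (res : Int)
    (hget : ∀ k, m.getD k 0 = (seen.count k : Int))
    (hcon : ∀ k, m.contains k = decide (k ∈ seen)) :
    (if m.contains tmp = false then res + 0 else res + m.getD tmp 0)
      = res + (seen.count tmp : Int) := by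
  by_cases hc : m.contains tmp = true
  · simp [hc, hget]
  · have hnot : tmp ∉ seen := by
      have h := hcon tmp
      rw [Bool.not_eq_true] at hc
      rw [hc] at h
      exact of_decide_eq_false h.symm
    have hz : seen.count tmp = 0 := List.count_eq_zero.mpr hnot
    simp [Bool.eq_false_iff.mpr hc, hz]

-- A's loop, under the dict-is-a-counter-of-seen-signatures invariant
theorem aLoop_eq (l : List Char) : ∀ (m : PySem.Dict (Int × Int) Int) (zc oc tc res : Int)
    (seen : List (Int × Int)),
    (∀ k, m.getD k 0 = (seen.count k : Int)) →
    (∀ k, m.contains k = decide (k ∈ seen)) →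
    aLoop m zc oc tc res l = res + sumBk seen (sigList (zc - oc, zc - tc) l) := by
  induction l with
  | nil => intro m zc oc tc res seen _ _; simp [aLoop, sumBk, sigList]
  | cons c t ih =>
    intro m zc oc tc res seen hget hcon
    have main : ∀ (zc' oc' tc' : Int),
        (zc' - oc', zc' - tc') = sigStep (zc - oc, zc - tc) c →
        (aLoop (if m.contains (zc' - oc', zc' - tc') then m.modify (zc' - oc', zc' - tc') 0 (· + 1)
                else m.insert (zc' - oc', zc' - tc') 1)
          zc' oc' tc'
          (if m.contains (zc' - oc', zc' - tc') = false then res + 0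
           else res + m.getD (zc' - oc', zc' - tc') 0) t)
        = res + sumBk seen (sigList (zc - oc, zc - tc) (c :: t)) := by
      intro zc' oc' tc' htmp
      rw [ih _ zc' oc' tc' _ ((zc' - oc', zc' - tc') :: seen)
            (dictStep_getD m seen _ hget hcon) (dictStep_contains m seen _ hcon),
          dictStep_res m seen _ res hget hcon]
      simp only [sigList, ← htmp, sumBk]
      ring
    by_cases h0 : c = '0'
    · simpa only [aLoop, h0, if_pos rfl] using
        main (zc + 1) oc tc (by apply Prod.ext <;> simp [sigStep, h0] <;> ring)
    · by_cases h1 : c = '1'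
      · simpa only [aLoop, h0, h1, if_neg h0, if_pos rfl] using
          main zc (oc + 1) tc (by apply Prod.ext <;> simp [sigStep, h1] <;> ring)
      · simpa only [aLoop, if_neg h0, if_neg h1] using
          main zc oc (tc + 1) (by apply Prod.ext <;> simp [sigStep, h0, h1] <;> ring)

-- ===== VERDICT (by name: the statement is the Claim_ definition above) =====
theorem get_equal_number_spec : Claim_equal_get_equal_number := by
  intro s _
  unfold Spec_get_equal_number get_equal_number get_equal_number_alt
  have hget : ∀ k, ((PySem.Dict.empty).insert ((0 : Int), (0 : Int)) 1).getD k 0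
      = (([((0 : Int), (0 : Int))].count k : Nat) : Int) := by
    intro k
    rw [PySem.Dict.getD_insert]
    by_cases hk : k = ((0 : Int), (0 : Int))
    · simp [hk]
    · simp [hk, Ne.symm hk, PySem.Dict.getD_empty]
  have hcon : ∀ k, ((PySem.Dict.empty).insert ((0 : Int), (0 : Int)) 1).contains k
      = decide (k ∈ [((0 : Int), (0 : Int))]) := by
    intro k
    rw [PySem.Dict.contains_insert]
    by_cases hk : k = ((0 : Int), (0 : Int)) <;>
      simp [hk, PySem.Dict.contains_empty, List.mem_cons]
  rw [aLoop_eq _ _ _ _ _ _ _ hget hcon, bOuter_eq, sumBk_eq, crossCnt_singleton]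
  simp only [sumFwd, sub_zero]
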